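-- pv_equiv track=rewrite | github.com/tushar-1226/AGENT | backend/modules/metrics_analyzer.py | _calculate_complexity_distribution
-- ===== SOURCE A (Python) =====
-- from typing import Dict, List, Optional, Any
--
-- def _calculate_complexity_distribution(files: List[Dict[str, Any]]) -> Dict[str, Any]:
--     """Calculate complexity distribution"""
--
--     distribution = {
--         "low": 0,      # 1-5
--         "medium": 0,   # 6-10
--         "high": 0,     # 11-20
--         "very_high": 0 # 21+
--     }
--
--     for file_metrics in files:
--         if "error" in file_metrics:
--             continue
--
--         complexity = file_metrics["complexity"]["cyclomatic"]
--
--         if complexity <= 5: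
--             distribution["low"] += 1
--         elif complexity <= 10:
--             distribution["medium"] += 1
--         elif complexity <= 20:
--             distribution["high"] += 1
--         else:
--             distribution["very_high"] += 1
--
--     return distribution
-- ===== SOURCE B (Python) =====
-- from typing import Dict, List, Optional, Any
--
-- def _calculate_complexity_distribution(files: List[Dict[str, Any]]) -> Dict[str, Any]:
--     """Calculate complexity distribution (threshold-table formulation)."""
--     labels = ["low", "medium", "high", "very_high"]
--     cats = [sum(c > b for b in (5, 10, 20))
--             for fm in files if "error" not in fm
--             for c in [fm["complexity"]["cyclomatic"]]]
--     return {lab: cats.count(i) for i, lab in enumerate(labels)}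
-- ===== Notes on version B (the rewrite author's own statement) =====
-- stated objective: idiomatic
-- what changed: Replaces the if/elif branch cascade mutating a dict with a threshold-table formulation: each file is mapped to a category index (how many of the bounds 5,10,20 its complexity exceeds) and the result dict is built once by counting each index per label.
import Mathlib
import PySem

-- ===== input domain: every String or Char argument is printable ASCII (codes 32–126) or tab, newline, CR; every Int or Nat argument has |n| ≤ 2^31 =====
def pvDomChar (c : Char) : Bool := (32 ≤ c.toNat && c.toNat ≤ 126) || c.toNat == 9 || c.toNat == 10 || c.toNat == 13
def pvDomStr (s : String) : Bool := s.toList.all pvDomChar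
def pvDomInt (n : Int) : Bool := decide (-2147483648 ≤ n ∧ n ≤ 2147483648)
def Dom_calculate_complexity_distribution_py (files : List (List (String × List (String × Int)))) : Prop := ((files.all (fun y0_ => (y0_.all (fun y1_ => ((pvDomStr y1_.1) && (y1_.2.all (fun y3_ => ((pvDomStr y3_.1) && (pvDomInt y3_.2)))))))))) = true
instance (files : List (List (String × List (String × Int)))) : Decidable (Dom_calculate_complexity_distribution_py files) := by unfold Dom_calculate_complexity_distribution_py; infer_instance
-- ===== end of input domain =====

-- B replaces A's if/elif cascade over a mutated dict with a threshold table: map each file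
-- to a category index, then build the result by counting indices per label. Same cost.

-- ===== PORT A =====
-- A's loop: mutate a literal-keyed dict, choosing the key by an if/elif cascade.
-- On a file without "error" where "complexity"/"cyclomatic" is missing Python raises
-- KeyError (the `none` arms below; excluded by Pre_).
def pvStepA (dist : PySem.Dict String Int) (fm : List (String × List (String × Int))) : PySem.Dict String Int :=
  let fd := PySem.Dict.mk fm
  if fd.contains "error" then dist
  else
    match fd.get? "complexity" with
    | none => dist
    | some comp =>
      match (PySem.Dict.mk comp).get? "cyclomatic" with
      | none => dist
      | some c =>
        if c ≤ 5 then dist.modify "low" 0 (· + 1)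
        else if c ≤ 10 then dist.modify "medium" 0 (· + 1)
        else if c ≤ 20 then dist.modify "high" 0 (· + 1)
        else dist.modify "very_high" 0 (· + 1)

def calculate_complexity_distribution_py (files : List (List (String × List (String × Int)))) : List (String × Int) :=
  (files.foldl pvStepA (PySem.Dict.mk [("low", 0), ("medium", 0), ("high", 0), ("very_high", 0)])).items

-- ===== PORT B =====
-- Source B: cats = [sum(c > b for b in (5,10,20)) for fm in files if "error" not in fm for c in [...]]
def pvCats (files : List (List (String × List (String × Int)))) : List Int :=
  files.filterMap (fun fm =>
    let fd := PySem.Dict.mk fm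
    if fd.contains "error" then none
    else
      ((fd.get? "complexity").bind (fun comp => (PySem.Dict.mk comp).get? "cyclomatic")).map
        (fun c => (([5, 10, 20] : List Int).map (fun b => if b < c then (1 : Int) else 0)).sum))

-- Source B: {lab: cats.count(i) for i, lab in enumerate(labels)}
def calculate_complexity_distribution_py_alt (files : List (List (String × List (String × Int)))) : List (String × Int) :=
  (PySem.List.enumerate ["low", "medium", "high", "very_high"]).map
    (fun p => (p.2, (PySem.List.count (pvCats files) p.1 : Int)))

-- ===== PRECONDITION & SPEC =====
-- Pre_ excludes exactly the inputs where Python A raises KeyError: a file dict without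
-- "error" that lacks "complexity" or whose complexity dict lacks "cyclomatic".
def Pre_calculate_complexity_distribution_py (files : List (List (String × List (String × Int)))) : Prop :=
  ∀ fm ∈ files, (PySem.Dict.mk fm).contains "error" = true ∨
    ∃ comp, (PySem.Dict.mk fm).get? "complexity" = some comp ∧
      ((PySem.Dict.mk comp).get? "cyclomatic").isSome = true
instance (files : List (List (String × List (String × Int)))) : Decidable (Pre_calculate_complexity_distribution_py files) := by unfold Pre_calculate_complexity_distribution_py; infer_instance

def pvWitness_calculate_complexity_distribution_py : (List (List (String × List (String × Int)))) :=
  [[("complexity", [("cyclomatic", 7)])], [("error", [])], [("complexity", [("cyclomatic", 25)])]]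

def Spec_calculate_complexity_distribution_py (files : List (List (String × List (String × Int)))) (out : List (String × Int)) : Prop := out = calculate_complexity_distribution_py_alt files
instance (files : List (List (String × List (String × Int)))) (out : List (String × Int)) : Decidable (Spec_calculate_complexity_distribution_py files out) := by unfold Spec_calculate_complexity_distribution_py; infer_instance

-- ===== CLAIM (what is proved, stated in full; the proofs are below) =====
def Claim_equal_calculate_complexity_distribution_py : Prop := ∀ (files : List (List (String × List (String × Int)))), Dom_calculate_complexity_distribution_py files → Pre_calculate_complexity_distribution_py files → Spec_calculate_complexity_distribution_py files (calculate_complexity_distribution_py files)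

-- ===== LEMMAS AND PROOFS =====

-- The category index B computes, as a case split on A's branch conditions.
theorem pvIdx_cases (c : Int) :
    ((if 5 < c then (1 : Int) else 0) + ((if 10 < c then 1 else 0) + if 20 < c then 1 else 0)) =
      if c ≤ 5 then 0 else if c ≤ 10 then 1 else if c ≤ 20 then 2 else 3 := by
  split_ifs <;> omega

-- Loop invariant: A's foldl from any literal distribution equals that distribution plus
-- the per-index counts of B's category list.
theorem pvFold_eq (files : List (List (String × List (String × Int)))) (a b c d : Int) :
    files.foldl pvStepA (PySem.Dict.mk [("low", a), ("medium", b), ("high", c), ("very_high", d)]) =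
      PySem.Dict.mk [("low", a + (PySem.List.count (pvCats files) 0 : Int)),
                     ("medium", b + (PySem.List.count (pvCats files) 1 : Int)),
                     ("high", c + (PySem.List.count (pvCats files) 2 : Int)),
                     ("very_high", d + (PySem.List.count (pvCats files) 3 : Int))] := by
  induction files generalizing a b c d with
  | nil => simp [pvCats, PySem.List.count]
  | cons fm rest ih =>
    simp only [List.foldl_cons]
    by_cases herr : (fm.any fun p => p.1 == "error") = true
    · have hstep : pvStepA (PySem.Dict.mk [("low", a), ("medium", b), ("high", c), ("very_high", d)]) fm =
          PySem.Dict.mk [("low", a), ("medium", b), ("high", c), ("very_high", d)] := by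
        simp [pvStepA, PySem.Dict.contains_mk, herr]
      have hcats : pvCats (fm :: rest) = pvCats rest := by
        simp [pvCats, herr]
      rw [hstep, ih, hcats]
    · cases hcomp : (PySem.Dict.mk fm).get? "complexity" with
      | none =>
        simp only [PySem.Dict.get?] at hcomp
        have hstep : pvStepA (PySem.Dict.mk [("low", a), ("medium", b), ("high", c), ("very_high", d)]) fm =
            PySem.Dict.mk [("low", a), ("medium", b), ("high", c), ("very_high", d)] := by
          simp only [pvStepA, PySem.Dict.get?, PySem.Dict.contains_mk, herr]
          rw [hcomp]
          simp
        have hcats : pvCats (fm :: rest) = pvCats rest := by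
          simp only [pvCats, List.filterMap_cons, PySem.Dict.get?, PySem.Dict.contains_mk, herr]
          rw [hcomp]
          simp
        rw [hstep, ih, hcats]
      | some comp =>
        cases hcyc : (PySem.Dict.mk comp).get? "cyclomatic" with
        | none =>
          simp only [PySem.Dict.get?] at hcomp hcyc
          have hstep : pvStepA (PySem.Dict.mk [("low", a), ("medium", b), ("high", c), ("very_high", d)]) fm =
              PySem.Dict.mk [("low", a), ("medium", b), ("high", c), ("very_high", d)] := by
            simp only [pvStepA, PySem.Dict.get?, PySem.Dict.contains_mk, herr]
            rw [hcomp]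
            simp [hcyc]
          have hcats : pvCats (fm :: rest) = pvCats rest := by
            simp only [pvCats, List.filterMap_cons, PySem.Dict.get?, PySem.Dict.contains_mk, herr]
            rw [hcomp]
            simp [hcyc]
          rw [hstep, ih, hcats]
        | some cc =>
          simp only [PySem.Dict.get?] at hcomp hcyc
          have hcats : pvCats (fm :: rest) =
              (if cc ≤ 5 then (0 : Int) else if cc ≤ 10 then 1 else if cc ≤ 20 then 2 else 3) :: pvCats rest := by
            rw [← pvIdx_cases cc]
            simp only [pvCats, List.filterMap_cons, PySem.Dict.get?, PySem.Dict.contains_mk, herr]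
            rw [hcomp]
            simp [hcyc]
          rw [hcats]
          have hget : ∀ (e : PySem.Dict String Int), pvStepA e fm =
              (if cc ≤ 5 then e.modify "low" 0 (· + 1)
               else if cc ≤ 10 then e.modify "medium" 0 (· + 1)
               else if cc ≤ 20 then e.modify "high" 0 (· + 1)
               else e.modify "very_high" 0 (· + 1)) := by
            intro e
            simp only [pvStepA, PySem.Dict.get?, PySem.Dict.contains_mk, herr]
            rw [hcomp]
            simp [hcyc]
          rw [hget]
          by_cases h5 : cc ≤ 5
          · rw [if_pos h5]
            have hmod : (PySem.Dict.mk [("low", a), ("medium", b), ("high", c), ("very_high", d)]).modify "low" 0 (· + 1) =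
                PySem.Dict.mk [("low", a + 1), ("medium", b), ("high", c), ("very_high", d)] := by
              simp [PySem.Dict.modify, PySem.Dict.insert, PySem.Dict.getD, PySem.Dict.get?, PySem.Dict.contains]
            rw [hmod, ih]
            simp [h5, PySem.List.count]
            ring
          · by_cases h10 : cc ≤ 10
            · rw [if_neg h5, if_pos h10]
              have hmod : (PySem.Dict.mk [("low", a), ("medium", b), ("high", c), ("very_high", d)]).modify "medium" 0 (· + 1) =
                  PySem.Dict.mk [("low", a), ("medium", b + 1), ("high", c), ("very_high", d)] := by
                simp [PySem.Dict.modify, PySem.Dict.insert, PySem.Dict.getD, PySem.Dict.get?, PySem.Dict.contains]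
              rw [hmod, ih]
              simp [h5, h10, PySem.List.count]
              ring
            · by_cases h20 : cc ≤ 20
              · rw [if_neg h5, if_neg h10, if_pos h20]
                have hmod : (PySem.Dict.mk [("low", a), ("medium", b), ("high", c), ("very_high", d)]).modify "high" 0 (· + 1) =
                    PySem.Dict.mk [("low", a), ("medium", b), ("high", c + 1), ("very_high", d)] := by
                  simp [PySem.Dict.modify, PySem.Dict.insert, PySem.Dict.getD, PySem.Dict.get?, PySem.Dict.contains]
                rw [hmod, ih]
                simp [h5, h10, h20, PySem.List.count]
                ring
              · rw [if_neg h5, if_neg h10, if_neg h20]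
                have hmod : (PySem.Dict.mk [("low", a), ("medium", b), ("high", c), ("very_high", d)]).modify "very_high" 0 (· + 1) =
                    PySem.Dict.mk [("low", a), ("medium", b), ("high", c), ("very_high", d + 1)] := by
                  simp [PySem.Dict.modify, PySem.Dict.insert, PySem.Dict.getD, PySem.Dict.get?, PySem.Dict.contains]
                rw [hmod, ih]
                simp [h5, h10, h20, PySem.List.count]
                ring

-- ===== VERDICT (by name: the statement is the Claim_ definition above) =====
theorem calculate_complexity_distribution_py_spec : Claim_equal_calculate_complexity_distribution_py := by
  intro files _ _
  unfold Spec_calculate_complexity_distribution_py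
  unfold calculate_complexity_distribution_py calculate_complexity_distribution_py_alt
  rw [pvFold_eq]
  simp [PySem.List.enumerate]
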